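-- pv_equiv track=rewrite | github.com/fredyvelasquezgt/Lab-2-Redes | Angel/Emisor.py | viterbi_encoder
-- ===== SOURCE A (Python) =====
-- def viterbi_encoder(input_bits):
--     g1 = [1, 1, 1]   # 1 + D + D^2
--     g2 = [1, 0, 1]   # 1 + D^2
--
--     # Utils
--     encoded_bits = []
--     state = [0, 0]
--
--     for bit in input_bits:
--         output1 = state[0] ^ state[1] ^ bit
--         output2 = state[0] ^ bit
--
--         state = [bit] + state[:-1]
--
--         encoded_bits.extend([output1, output2])
--
--     return encoded_bits
-- ===== SOURCE B (Python) =====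
-- def viterbi_encoder(input_bits):
--     bits = list(input_bits)
--     encoded = []
--     for b, p1, p2 in zip(bits, [0] + bits, [0, 0] + bits):
--         encoded += [b ^ p1 ^ p2, b ^ p1]
--     return encoded
-- ===== Notes on version B (the rewrite author's own statement) =====
-- stated objective: simpler
-- what changed: Replaces the mutable shift-register state (a fresh 2-element list rebuilt via slicing each iteration) with a stateless zip of the bit list against its 1- and 2-delayed copies, emitting both outputs per triple.
import Mathlib
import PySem

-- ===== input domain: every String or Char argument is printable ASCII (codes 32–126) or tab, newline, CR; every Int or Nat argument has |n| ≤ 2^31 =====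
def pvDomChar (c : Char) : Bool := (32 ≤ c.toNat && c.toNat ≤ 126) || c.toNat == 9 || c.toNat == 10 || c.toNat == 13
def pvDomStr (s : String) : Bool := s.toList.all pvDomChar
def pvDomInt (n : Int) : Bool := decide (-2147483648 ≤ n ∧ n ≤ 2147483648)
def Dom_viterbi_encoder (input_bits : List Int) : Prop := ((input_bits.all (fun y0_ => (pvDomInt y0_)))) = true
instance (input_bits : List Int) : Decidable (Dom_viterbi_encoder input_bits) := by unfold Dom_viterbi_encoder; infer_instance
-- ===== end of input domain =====

-- B replaces A's mutable two-cell shift-register state with a stateless zip of the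
-- bit list against its 1- and 2-delayed copies (objective: simpler).

-- ===== PORT A =====
-- loop body of A: appends the two outputs, shifts the register (state = [bit] + state[:-1])
def pvStepA (acc : List Int × List Int) (bit : Int) : List Int × List Int :=
  (acc.1 ++ [PySem.Int.bxor (PySem.Int.bxor (acc.2.getD 0 0) (acc.2.getD 1 0)) bit,
             PySem.Int.bxor (acc.2.getD 0 0) bit],
   bit :: acc.2.dropLast)

def viterbi_encoder (input_bits : List Int) : List Int :=
  (input_bits.foldl pvStepA ([], [0, 0])).1

-- ===== PORT B =====
-- loop body of B: encoded += [b ^ p1 ^ p2, b ^ p1]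
def pvStepB (enc : List Int) (t : Int × Int × Int) : List Int :=
  enc ++ [PySem.Int.bxor (PySem.Int.bxor t.1 t.2.1) t.2.2, PySem.Int.bxor t.1 t.2.1]

def viterbi_encoder_alt (input_bits : List Int) : List Int :=
  ((input_bits.zip ((0 :: input_bits).zip (0 :: 0 :: input_bits))).foldl pvStepB [])

-- ===== PRECONDITION & SPEC =====
def Spec_viterbi_encoder (input_bits : List Int) (out : List Int) : Prop := out = viterbi_encoder_alt input_bits
instance (input_bits : List Int) (out : List Int) : Decidable (Spec_viterbi_encoder input_bits out) := by unfold Spec_viterbi_encoder; infer_instance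

-- ===== CLAIM (what is proved, stated in full; the proofs are below) =====
def Claim_equal_viterbi_encoder : Prop := ∀ (input_bits : List Int), Dom_viterbi_encoder input_bits → Spec_viterbi_encoder input_bits (viterbi_encoder input_bits)

-- ===== LEMMAS AND PROOFS =====

-- sign/magnitude coding of an Int, used to reason about PySem.Int.bxor abstractly
def pvDec (n : Nat) (s : Bool) : Int := if s then -(n : Int) - 1 else (n : Int)

def pvMag (a : Int) : Nat := if 0 ≤ a then a.toNat else (-a - 1).toNat
def pvSign (a : Int) : Bool := decide (a < 0)

theorem pvDec_mag_sign (a : Int) : pvDec (pvMag a) (pvSign a) = a := by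
  unfold pvDec pvMag pvSign
  by_cases h : 0 ≤ a
  · simp [h, not_lt.mpr h, Int.toNat_of_nonneg h]
  · have h' : a < 0 := lt_of_not_ge h
    simp only [h, if_false, h', decide_true, if_true]
    have : (0:Int) ≤ -a - 1 := by omega
    rw [Int.toNat_of_nonneg this]; ring

theorem pvBxor_dec (m n : Nat) (s t : Bool) :
    PySem.Int.bxor (pvDec m s) (pvDec n t) = pvDec (m ^^^ n) (xor s t) := by
  have hpos : ∀ k : Nat, (0 : Int) ≤ (k : Int) := fun k => Int.natCast_nonneg k
  have hneg : ∀ k : Nat, ¬ (0 : Int) ≤ -(k : Int) - 1 := by intro k; have := hpos k; omega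
  have hmag : ∀ k : Nat, (-(-(k : Int) - 1) - 1).toNat = k := by
    intro k; have : (-(-(k : Int) - 1) - 1) = (k : Int) := by ring
    rw [this, Int.toNat_natCast]
  cases s <;> cases t
  · show PySem.Int.bxor (m : Int) (n : Int) = ((m ^^^ n : Nat) : Int)
    unfold PySem.Int.bxor
    rw [if_pos (hpos m), if_pos (hpos n), Int.toNat_natCast, Int.toNat_natCast]
  · show PySem.Int.bxor (m : Int) (-(n : Int) - 1) = -((m ^^^ n : Nat) : Int) - 1
    unfold PySem.Int.bxor
    rw [if_pos (hpos m), if_neg (hneg n), Int.toNat_natCast, hmag]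
  · show PySem.Int.bxor (-(m : Int) - 1) (n : Int) = -((m ^^^ n : Nat) : Int) - 1
    unfold PySem.Int.bxor
    rw [if_neg (hneg m), if_pos (hpos n), Int.toNat_natCast, hmag]
  · show PySem.Int.bxor (-(m : Int) - 1) (-(n : Int) - 1) = ((m ^^^ n : Nat) : Int)
    unfold PySem.Int.bxor
    rw [if_neg (hneg m), if_neg (hneg n), hmag, hmag]

theorem pvBxor_rotate (a b c : Int) :
    PySem.Int.bxor (PySem.Int.bxor a b) c = PySem.Int.bxor (PySem.Int.bxor c a) b := by
  rw [← pvDec_mag_sign a, ← pvDec_mag_sign b, ← pvDec_mag_sign c]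
  rw [pvBxor_dec, pvBxor_dec, pvBxor_dec, pvBxor_dec]
  have hn : ∀ x y z : Nat, (x ^^^ y) ^^^ z = (z ^^^ x) ^^^ y := by
    intro x y z
    rw [Nat.xor_assoc, Nat.xor_comm y z, ← Nat.xor_assoc, Nat.xor_comm x z]
  have hb : ∀ x y z : Bool, xor (xor x y) z = xor (xor z x) y := by decide
  rw [hn, hb]

-- the common unfolded form of both encoders, starting from register contents (s0, s1)
def pvEnc : List Int → Int → Int → List Int
  | [], _, _ => []
  | b :: t, s0, s1 =>
    PySem.Int.bxor (PySem.Int.bxor s0 s1) b :: PySem.Int.bxor s0 b :: pvEnc t b s0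

theorem pvFoldA (l : List Int) : ∀ (enc : List Int) (s0 s1 : Int),
    (l.foldl pvStepA (enc, [s0, s1])).1 = enc ++ pvEnc l s0 s1 := by
  induction l with
  | nil => intro enc s0 s1; simp [pvEnc]
  | cons b t ih =>
    intro enc s0 s1
    simp only [List.foldl, pvStepA, pvEnc, List.getD, List.dropLast]
    rw [ih]
    simp [List.append_assoc]

theorem pvFoldB (l : List Int) : ∀ (enc : List Int) (s0 s1 : Int),
    ((l.zip ((s0 :: l).zip (s1 :: s0 :: l))).foldl pvStepB enc) = enc ++ pvEnc l s0 s1 := by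
  induction l with
  | nil => intro enc s0 s1; simp [pvEnc]
  | cons b t ih =>
    intro enc s0 s1
    have ih' := ih (enc ++ [PySem.Int.bxor (PySem.Int.bxor b s0) s1, PySem.Int.bxor b s0]) b s0
    simp only [List.zip_cons_cons, List.foldl, pvStepB, pvEnc] at ih' ⊢
    rw [ih']
    have h2 : PySem.Int.bxor b s0 = PySem.Int.bxor s0 b := PySem.Int.bxor_comm b s0
    have h3 : PySem.Int.bxor (PySem.Int.bxor s0 b) s1
            = PySem.Int.bxor (PySem.Int.bxor s0 s1) b := by
      rw [pvBxor_rotate s0 b s1, PySem.Int.bxor_comm s1 s0]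
    simp [h2, h3, List.append_assoc]

-- ===== VERDICT (by name: the statement is the Claim_ definition above) =====
theorem viterbi_encoder_spec : Claim_equal_viterbi_encoder := by
  intro input_bits _
  unfold Spec_viterbi_encoder viterbi_encoder viterbi_encoder_alt
  rw [pvFoldA, pvFoldB]
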